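-- pv_equiv track=rewrite | github.com/devops-tatvacare/managed-care-platform | backend/app/services/score_engine.py | _match_diagnosis_keyword
-- ===== SOURCE A (Python) =====
-- _ICD_KEYWORD_MAP: list[tuple[str, list[str]]] = [
--     ("E11.4", ["neuropathy"]),
--     ("E11.3", ["retinopathy"]),
--     ("E11.31", ["non-proliferative retinopathy"]),
--     ("E11.35", ["proliferative retinopathy"]),
--     ("N18.3", ["ckd g3a"]),
--     ("N18.4", ["ckd g3b"]),
--     ("N18.5", ["ckd g4"]),
--     ("N18.", ["ckd"]),
--     ("I25.", ["cvd", "established cvd"]),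
--     ("I21.", ["cvd", "established cvd"]),
--     ("I50.", ["heart failure"]),
--     ("E11.52", ["amputation", "foot ulcer"]),
--     ("E11.6", ["microalbuminuria", "macroalbuminuria"]),
-- ]
--
-- def _match_diagnosis_keyword(criterion: str, active_codes: list[str]) -> bool:
--     """Check if a diagnosis criterion matches any of the patient's ICD-10 codes.
--
--     Uses keyword matching on the criterion text + ICD prefix lookup.
--     """
--     crit_lower = criterion.lower()
--
--     # "No complications" is the default row — only matches if there are no complications
--     if "no complication" in crit_lower:
--         return len(active_codes) == 0
--
--     for icd_prefix, keywords in _ICD_KEYWORD_MAP: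
--         if any(kw in crit_lower for kw in keywords):
--             if any(code.upper().startswith(icd_prefix.upper()) for code in active_codes):
--                 return True
--
--     return False
-- ===== SOURCE B (Python) =====
-- _ICD_KEYWORD_MAP: list[tuple[str, list[str]]] = [
--     ("E11.4", ["neuropathy"]),
--     ("E11.3", ["retinopathy"]),
--     ("E11.31", ["non-proliferative retinopathy"]),
--     ("E11.35", ["proliferative retinopathy"]),
--     ("N18.3", ["ckd g3a"]),
--     ("N18.4", ["ckd g3b"]),
--     ("N18.5", ["ckd g4"]),
--     ("N18.", ["ckd"]),
--     ("I25.", ["cvd", "established cvd"]),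
--     ("I21.", ["cvd", "established cvd"]),
--     ("I50.", ["heart failure"]),
--     ("E11.52", ["amputation", "foot ulcer"]),
--     ("E11.6", ["microalbuminuria", "macroalbuminuria"]),
-- ]
--
-- # Hash index built once: uppercased ICD prefix -> its keyword list, plus the
-- # distinct prefix lengths.  A code matches a prefix iff slicing the code at one
-- # of these lengths hits a key of the index — no scan of the table per code.
-- _PREFIX_INDEX: dict[str, list[str]] = {p.upper(): kws for p, kws in _ICD_KEYWORD_MAP}
-- _PREFIX_LENGTHS: list[int] = sorted({len(p) for p, _ in _ICD_KEYWORD_MAP})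
--
--
-- def _match_diagnosis_keyword(criterion: str, active_codes: list[str]) -> bool:
--     crit_lower = criterion.lower()
--
--     if "no complication" in crit_lower:
--         return len(active_codes) == 0
--
--     for code in active_codes:
--         u = code.upper()
--         for n in _PREFIX_LENGTHS:
--             kws = _PREFIX_INDEX.get(u[:n])
--             if kws is not None and any(kw in crit_lower for kw in kws):
--                 return True
--     return False
-- ===== Notes on version B (the rewrite author's own statement) =====
-- stated objective: alternative
-- what changed: Replaces A's per-row table scan with a hash index built once (uppercased ICD prefix -> keywords, plus the distinct prefix lengths); each patient code is then matched by O(1) dict lookups of its own slices, so the inner 13-row scan and the repeated startswith tests disappear.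
import Mathlib
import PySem

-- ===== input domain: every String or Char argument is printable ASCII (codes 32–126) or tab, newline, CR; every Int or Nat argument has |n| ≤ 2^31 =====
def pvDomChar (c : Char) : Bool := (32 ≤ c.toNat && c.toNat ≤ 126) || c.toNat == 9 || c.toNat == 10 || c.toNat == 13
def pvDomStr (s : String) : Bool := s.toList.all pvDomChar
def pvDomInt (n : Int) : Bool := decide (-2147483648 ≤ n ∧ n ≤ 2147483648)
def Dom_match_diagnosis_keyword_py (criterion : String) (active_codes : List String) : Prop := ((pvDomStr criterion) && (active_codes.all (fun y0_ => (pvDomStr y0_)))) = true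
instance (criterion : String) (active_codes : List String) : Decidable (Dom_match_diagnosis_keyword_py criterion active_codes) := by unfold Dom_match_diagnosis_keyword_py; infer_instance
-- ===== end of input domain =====

-- B replaces A's per-row table scan with a hash index (uppercased prefix -> keywords) built once
-- plus the distinct prefix lengths; each code is matched by dict lookups of its own slices.
-- Objective: alternative data structure, same results.

-- the module-level constant _ICD_KEYWORD_MAP (shared by both Pythons)
def pvICDKeywordMap : List (String × List String) := [
  ("E11.4", ["neuropathy"]),
  ("E11.3", ["retinopathy"]),
  ("E11.31", ["non-proliferative retinopathy"]),
  ("E11.35", ["proliferative retinopathy"]),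
  ("N18.3", ["ckd g3a"]),
  ("N18.4", ["ckd g3b"]),
  ("N18.5", ["ckd g4"]),
  ("N18.", ["ckd"]),
  ("I25.", ["cvd", "established cvd"]),
  ("I21.", ["cvd", "established cvd"]),
  ("I50.", ["heart failure"]),
  ("E11.52", ["amputation", "foot ulcer"]),
  ("E11.6", ["microalbuminuria", "macroalbuminuria"])]

-- ===== PORT A =====
-- the for-loop with early 'return True' and final 'return False' is List.any over the table rows
def match_diagnosis_keyword_py (criterion : String) (active_codes : List String) : Bool :=
  let crit_lower := PySem.Str.lower criterion
  if PySem.Str.isIn "no complication" crit_lower then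
    decide (active_codes.length = 0)
  else
    pvICDKeywordMap.any (fun e =>
      (e.2.any (fun kw => PySem.Str.isIn kw crit_lower)) &&
      (active_codes.any (fun code =>
        PySem.Str.startswith (PySem.Str.upper code) (PySem.Str.upper e.1))))

-- ===== PORT B =====
-- B's module constants: _PREFIX_INDEX (dict comprehension = fold of insert) and _PREFIX_LENGTHS
def pvPrefixIndex : PySem.Dict String (List String) :=
  pvICDKeywordMap.foldl (fun d e => d.insert (PySem.Str.upper e.1) e.2) PySem.Dict.empty

def pvPrefixLengths : List Int :=
  PySem.List.sorted
    (PySem.Set.ofList (pvICDKeywordMap.map (fun e => (PySem.Str.len e.1 : Int))))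
    (fun x => x) false

-- the double for-loop with early 'return True' and final 'return False' is nested List.any;
-- '_PREFIX_INDEX.get(u[:n])' with the 'is not None' test is the match on Dict.get?
def match_diagnosis_keyword_py_alt (criterion : String) (active_codes : List String) : Bool :=
  let crit_lower := PySem.Str.lower criterion
  if PySem.Str.isIn "no complication" crit_lower then
    decide (active_codes.length = 0)
  else
    active_codes.any (fun code =>
      let u := PySem.Str.upper code
      pvPrefixLengths.any (fun n =>
        match pvPrefixIndex.get? (PySem.Str.slice u none (some n)) with
        | some kws => kws.any (fun kw => PySem.Str.isIn kw crit_lower)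
        | none => false))

-- ===== PRECONDITION & SPEC =====
def Spec_match_diagnosis_keyword_py (criterion : String) (active_codes : List String) (out : Bool) : Prop := out = match_diagnosis_keyword_py_alt criterion active_codes
instance (criterion : String) (active_codes : List String) (out : Bool) : Decidable (Spec_match_diagnosis_keyword_py criterion active_codes out) := by unfold Spec_match_diagnosis_keyword_py; infer_instance

-- ===== CLAIM (what is proved, stated in full; the proofs are below) =====
def Claim_equal_match_diagnosis_keyword_py : Prop := ∀ (criterion : String) (active_codes : List String), Dom_match_diagnosis_keyword_py criterion active_codes → Spec_match_diagnosis_keyword_py criterion active_codes (match_diagnosis_keyword_py criterion active_codes)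

-- ===== LEMMAS AND PROOFS =====

-- B's module constants evaluate to literals
theorem pv_idx_eq : pvPrefixIndex = PySem.Dict.mk pvICDKeywordMap := by decide

theorem pv_len_eq : pvPrefixLengths = [4, 5, 6] := by decide

-- per table entry: its prefix is already uppercase and has length 4, 5 or 6
theorem pv_entry_facts : ∀ e ∈ pvICDKeywordMap,
    PySem.Str.upper e.1 = e.1 ∧
    (e.1.toList.length = 4 ∨ e.1.toList.length = 5 ∨ e.1.toList.length = 6) := by decide

theorem pv_idx_nodup : (PySem.Dict.mk pvICDKeywordMap).keys.Nodup := by decide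

-- a fixed-length take equals k iff k is a prefix (for k of that length)
theorem pv_take_eq_iff (u k : List Char) (L : Nat) (hk : k.length = L) :
    u.take L = k ↔ k <+: u := by
  constructor
  · rintro rfl; exact List.take_prefix L u
  · intro h
    have := List.prefix_iff_eq_take.mp h
    rw [hk] at this; exact this.symm

-- the core equivalence: A's row-outer table scan = B's code-outer index lookups
theorem pv_core (crit_lower : String) (active_codes : List String) :
    pvICDKeywordMap.any (fun e =>
      (e.2.any (fun kw => PySem.Str.isIn kw crit_lower)) &&
      (active_codes.any (fun code =>
        PySem.Str.startswith (PySem.Str.upper code) (PySem.Str.upper e.1)))) =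
    active_codes.any (fun code =>
      pvPrefixLengths.any (fun n =>
        match pvPrefixIndex.get? (PySem.Str.slice (PySem.Str.upper code) none (some n)) with
        | some kws => kws.any (fun kw => PySem.Str.isIn kw crit_lower)
        | none => false)) := by
  simp only [pv_idx_eq, pv_len_eq]
  rw [Bool.eq_iff_iff]
  simp only [List.any_eq_true, Bool.and_eq_true, List.mem_cons, List.not_mem_nil, or_false]
  constructor
  · rintro ⟨e, he, hkw, code, hc, hsw⟩
    obtain ⟨hup, hlen⟩ := pv_entry_facts e he
    rw [hup] at hsw
    have hpre : e.1.toList <+: (PySem.Str.upper code).toList :=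
      (PySem.Chars.startswith_iff _ _).mp (by rw [← PySem.Str.startswith_eq]; exact hsw)
    have htake : (PySem.Str.upper code).toList.take e.1.toList.length = e.1.toList :=
      (pv_take_eq_iff _ _ _ rfl).mpr hpre
    have hkey : PySem.Str.slice (PySem.Str.upper code) none
        (some (e.1.toList.length : Int)) = e.1 := by
      rw [← String.toList_inj]
      simp only [PySem.Str.toList_slice, PySem.Chars.slice_eq_listSlice,
        PySem.List.slice_to_natCast]
      exact htake
    have hget : (PySem.Dict.mk pvICDKeywordMap).get?
        (PySem.Str.slice (PySem.Str.upper code) none (some (e.1.toList.length : Int)))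
        = some e.2 := by
      rw [hkey]
      exact PySem.Dict.get?_of_mem_items _ he pv_idx_nodup
    refine ⟨code, hc, (e.1.toList.length : Int), ?_, ?_⟩
    · rcases hlen with h | h | h <;> rw [h] <;> simp
    · rw [hget]
      simpa using hkw
  · rintro ⟨code, hc, n, hn, hmatch⟩
    have hnn : (0 : Int) ≤ n := by rcases hn with rfl | rfl | rfl <;> norm_num
    rcases hget : (PySem.Dict.mk pvICDKeywordMap).get?
        (PySem.Str.slice (PySem.Str.upper code) none (some n)) with _ | kws
    · rw [hget] at hmatch; simp at hmatch
    · rw [hget] at hmatch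
      have hmem : (PySem.Str.slice (PySem.Str.upper code) none (some n), kws)
          ∈ pvICDKeywordMap :=
        ((PySem.Dict.get?_eq_some_iff_mem_items _ _ _ pv_idx_nodup).mp hget)
      obtain ⟨hup, -⟩ := pv_entry_facts _ hmem
      refine ⟨_, hmem, by simpa using hmatch, code, hc, ?_⟩
      rw [hup]
      rw [PySem.Str.startswith_eq]
      apply (PySem.Chars.startswith_iff _ _).mpr
      simp only [PySem.Str.toList_slice, PySem.Chars.slice_eq_listSlice,
        PySem.List.slice_to _ hnn]
      exact List.take_prefix _ _

-- ===== VERDICT (by name: the statement is the Claim_ definition above) =====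
theorem match_diagnosis_keyword_py_spec : Claim_equal_match_diagnosis_keyword_py := by
  intro criterion active_codes _
  unfold Spec_match_diagnosis_keyword_py match_diagnosis_keyword_py match_diagnosis_keyword_py_alt
  simp only []
  split
  · rfl
  · exact pv_core (PySem.Str.lower criterion) active_codes
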